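-- pv_equiv track=rewrite | github.com/LL08-MathematicalModelling-dowell/100035-DowellScale-Function | backend/paired_comparison/utils.py | segment_ranking
-- ===== SOURCE A (Python) =====
-- def segment_ranking(arranged_ranking):
--     arranged_ranking.reverse()
--     result = []
--     i, j = 0, 1
--     cycle = 2
--     while j <= len(arranged_ranking):
--         result.append(arranged_ranking[i:j])
--         i = j
--         j += cycle
--         cycle += 1
--     result.reverse()
--     return result
-- ===== SOURCE B (Python) =====
-- def segment_ranking(arranged_ranking):
--     arranged_ranking.reverse()  # same in-place side effect as A
--     result = []
--     buf = []
--     target = 1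
--     for x in arranged_ranking:
--         buf.append(x)
--         if len(buf) == target:
--             result.append(buf)
--             buf = []
--             target += 1
--     # a leftover partial buffer is dropped, matching A's incomplete final chunk
--     result.reverse()
--     return result
-- ===== Notes on version B (the rewrite author's own statement) =====
-- stated objective: alternative
-- what changed: Replaced the index/slice while-loop (absolute indices i, j and a growing step 'cycle', slicing the list each iteration) by a single element-wise pass that accumulates a buffer and emits it whenever it reaches the growing target size.
import Mathlib
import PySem

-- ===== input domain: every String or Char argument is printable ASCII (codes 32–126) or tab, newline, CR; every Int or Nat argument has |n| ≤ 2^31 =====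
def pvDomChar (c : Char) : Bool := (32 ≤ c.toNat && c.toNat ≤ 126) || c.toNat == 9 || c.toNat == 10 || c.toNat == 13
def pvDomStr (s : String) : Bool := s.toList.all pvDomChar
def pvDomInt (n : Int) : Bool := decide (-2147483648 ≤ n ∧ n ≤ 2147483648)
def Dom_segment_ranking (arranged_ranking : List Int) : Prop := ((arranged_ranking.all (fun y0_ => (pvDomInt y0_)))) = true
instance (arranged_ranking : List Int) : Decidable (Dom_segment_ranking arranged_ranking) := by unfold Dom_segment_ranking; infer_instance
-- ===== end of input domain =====

-- B replaces A's index/slice while-loop by one buffer-accumulating pass (alternative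
-- decomposition, same cost). Both A and B reverse their argument in place in Python;
-- the equivalence proved here is about the RETURN value.

-- ===== PORT A =====
-- the while loop: i, j, cycle are always nonnegative, so they are carried as Nat;
-- cycle starts at 2 and only increments, so it is carried as c with cycle = c + 2
-- (this makes j strictly increase, giving termination).
def segAloop (xs : List Int) (i j c : Nat) : List (List Int) :=
  if j ≤ xs.length then
    PySem.List.slice xs (some (i : Int)) (some (j : Int)) :: segAloop xs j (j + (c + 2)) (c + 1)
  else []
termination_by xs.length + 1 - j
decreasing_by omega

def segment_ranking (arranged_ranking : List Int) : List (List Int) :=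
  (segAloop arranged_ranking.reverse 0 1 0).reverse

-- ===== PORT B =====
-- the for loop: state (buf, target, result); result is appended to, then reversed.
def segBstep (st : List Int × Nat × List (List Int)) (x : Int) : List Int × Nat × List (List Int) :=
  let buf := st.1 ++ [x]
  if buf.length = st.2.1 then ([], st.2.1 + 1, st.2.2 ++ [buf])
  else (buf, st.2.1, st.2.2)

def segment_ranking_alt (arranged_ranking : List Int) : List (List Int) :=
  (arranged_ranking.reverse.foldl segBstep ([], 1, [])).2.2.reverse

-- ===== PRECONDITION & SPEC =====
def Spec_segment_ranking (arranged_ranking : List Int) (out : List (List Int)) : Prop := out = segment_ranking_alt arranged_ranking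
instance (arranged_ranking : List Int) (out : List (List Int)) : Decidable (Spec_segment_ranking arranged_ranking out) := by unfold Spec_segment_ranking; infer_instance

-- ===== CLAIM (what is proved, stated in full; the proofs are below) =====
def Claim_equal_segment_ranking : Prop := ∀ (arranged_ranking : List Int), Dom_segment_ranking arranged_ranking → Spec_segment_ranking arranged_ranking (segment_ranking arranged_ranking)

-- ===== LEMMAS AND PROOFS =====

-- common characterisation: chunks ys n = the list of full chunks of sizes n+1, n+2, …
def chunks (ys : List Int) (n : Nat) : List (List Int) :=
  if n + 1 ≤ ys.length then ys.take (n + 1) :: chunks (ys.drop (n + 1)) (n + 1)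
  else []
termination_by ys.length
decreasing_by simp_all; omega

-- A's loop computes chunks of the dropped suffix (fuel-indexed strong induction)
theorem segAloop_eq_chunks (xs : List Int) : ∀ n i c, xs.length - i ≤ n → segAloop xs i (i + c + 1) c = chunks (xs.drop i) c := by
  intro n
  induction n with
  | zero =>
    intro i c h
    rw [segAloop, chunks]
    rw [if_neg (by omega), if_neg (by simp [List.length_drop]; omega)]
  | succ n ih =>
    intro i c h
    rw [segAloop, chunks]
    by_cases hj : i + c + 1 ≤ xs.length
    · rw [if_pos hj, if_pos (by simp [List.length_drop]; omega)]
      congr 1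
      · have hcast : ((i + c + 1 : Nat) : Int) = ((i : Nat) : Int) + ((c + 1 : Nat) : Int) := by push_cast; ring
        rw [show (some ((i + c + 1 : Nat) : Int)) = some (((i : Nat) : Int) + ((c + 1 : Nat) : Int)) by rw [hcast]]
        exact PySem.List.slice_natCast_add xs i (c + 1)
      · have h1 : segAloop xs (i + c + 1) ((i + c + 1) + (c + 1) + 1) (c + 1) = chunks (xs.drop (i + c + 1)) (c + 1) :=
          ih (i + c + 1) (c + 1) (by omega)
        rw [show i + c + 1 + (c + 2) = (i + c + 1) + (c + 1) + 1 by ring, h1, List.drop_drop]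
        congr 1
    · rw [if_neg hj, if_neg (by simp [List.length_drop]; omega)]

-- B's fold: general statement with a partially filled buffer
theorem segBfold_eq (ys : List Int) : ∀ buf t res, buf.length < t →
    (ys.foldl segBstep (buf, t, res)).2.2 =
      res ++ (if t - buf.length ≤ ys.length
              then (buf ++ ys.take (t - buf.length)) :: chunks (ys.drop (t - buf.length)) t
              else []) := by
  induction ys with
  | nil =>
    intro buf t res h
    simp only [List.foldl_nil, List.length_nil]
    rw [if_neg (by omega)]
    simp
  | cons x xs ih =>
    intro buf t res h
    simp only [List.foldl_cons, segBstep, List.length_append, List.length_singleton]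
    by_cases hfull : buf.length + 1 = t
    · rw [if_pos hfull]
      rw [ih [] (t + 1) (res ++ [buf ++ [x]]) (by simp)]
      have h1 : t - buf.length = 1 := by omega
      conv_rhs => rw [chunks]
      simp [h1]
    · rw [if_neg hfull]
      rw [ih (buf ++ [x]) t res (by simp; omega)]
      obtain ⟨k, hk⟩ : ∃ k, t - buf.length = k + 1 := ⟨t - buf.length - 1, by omega⟩
      have h1 : t - (buf ++ [x]).length = k := by simp; omega
      rw [h1, hk]
      simp [List.take_succ_cons, List.drop_succ_cons]

theorem alt_eq_chunks (xs : List Int) : segment_ranking_alt xs = (chunks xs.reverse 0).reverse := by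
  unfold segment_ranking_alt
  rw [segBfold_eq xs.reverse [] 1 [] (by simp)]
  conv_rhs => rw [chunks]
  simp

-- ===== VERDICT (by name: the statement is the Claim_ definition above) =====
theorem segment_ranking_spec : Claim_equal_segment_ranking := by
  intro xs _
  unfold Spec_segment_ranking
  rw [alt_eq_chunks]
  unfold segment_ranking
  congr 1
  have := segAloop_eq_chunks xs.reverse xs.reverse.length 0 0 (by omega)
  simpa using this
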